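-- pv_equiv track=rewrite | github.com/safwansamsudeen/frappe_search | frappe_search/frappe_search/doctype/search/search.py | groupby_and_trim_results
-- ===== SOURCE A (Python) =====
-- from collections import defaultdict
--
-- def groupby_and_trim_results(records, target_number):
--     results = defaultdict(list)
--     for record in records:
--         results[record["doctype"]].append(record)
--
--     max_group_length = target_number // len(results)
--     trimmed_groups = {}
--     n = 0
--
--     for doctype, res in results.items():
--         trimmed_groups[doctype] = res[:max_group_length]
--         n += len(res[:max_group_length])
--
--     return n, dict(
--         sorted(trimmed_groups.items(), key=lambda x: len(x[1]), reverse=True)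
--     )
-- ===== SOURCE B (Python) =====
-- def groupby_and_trim_results(records, target_number):
--     # staged pipeline: ordered dedup of doctypes, per-doctype filtered/trimmed
--     # groups built by comprehension, in-place sort, n recomputed by sum()
--     order = list(dict.fromkeys(r["doctype"] for r in records))
--     cap = target_number // len(order)
--     groups = [(dt, [r for r in records if r["doctype"] == dt][:cap]) for dt in order]
--     groups.sort(key=lambda g: len(g[1]), reverse=True)
--     return sum(len(g) for _, g in groups), dict(groups)
-- ===== Notes on version B (the rewrite author's own statement) =====
-- stated objective: alternative
-- what changed: B replaces A's single-pass defaultdict grouping with fold-accumulated trimming by a staged pipeline: an ordered dedup of the doctype keys, a per-doctype filter comprehension building the trimmed groups, an in-place sort, and n recomputed as a sum over the sorted groups instead of being accumulated while trimming.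
import Mathlib
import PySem

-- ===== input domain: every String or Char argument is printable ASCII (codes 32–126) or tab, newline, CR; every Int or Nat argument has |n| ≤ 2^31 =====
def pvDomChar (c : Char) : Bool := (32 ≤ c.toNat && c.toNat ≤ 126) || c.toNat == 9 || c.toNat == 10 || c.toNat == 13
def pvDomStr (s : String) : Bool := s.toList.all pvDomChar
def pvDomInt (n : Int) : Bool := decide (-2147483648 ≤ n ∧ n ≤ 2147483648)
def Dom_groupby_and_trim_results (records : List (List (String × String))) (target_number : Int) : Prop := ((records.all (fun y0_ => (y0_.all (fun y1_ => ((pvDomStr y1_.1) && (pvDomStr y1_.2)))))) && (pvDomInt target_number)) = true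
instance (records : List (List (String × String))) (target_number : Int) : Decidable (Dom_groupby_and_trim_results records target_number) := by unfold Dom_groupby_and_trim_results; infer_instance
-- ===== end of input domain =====

-- B replaces the defaultdict grouping/accumulating loops by a staged pipeline (ordered dedup,
-- per-doctype filtered trimmed groups, sort, sum); objective: alternative, no speed claim.

-- record["doctype"]; Pre_ guarantees the key is present, so the default is never used
def pvDoctype (r : List (String × String)) : String := (PySem.Dict.mk r).getD "doctype" ""

-- ===== PORT A =====
def groupby_and_trim_results (records : List (List (String × String))) (target_number : Int) : Int × (List (String × List (List (String × String)))) :=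
  let results : PySem.Dict String (List (List (String × String))) :=
    records.foldl (fun d record => d.modify (pvDoctype record) [] (fun x => x ++ [record])) PySem.Dict.empty
  let max_group_length : Int := PySem.Int.floordiv target_number (results.size : Int)
  let st :=
    results.items.foldl
      (fun (p : PySem.Dict String (List (List (String × String))) × Int) it =>
        (p.1.insert it.1 (PySem.List.slice it.2 none (some max_group_length)),
         p.2 + ((PySem.List.slice it.2 none (some max_group_length)).length : Int)))
      (PySem.Dict.empty, 0)
  (st.2, PySem.List.sorted st.1.items (fun x => (x.2.length : Int)) true)

-- ===== PORT B =====
def groupby_and_trim_results_alt (records : List (List (String × String))) (target_number : Int) : Int × (List (String × List (List (String × String)))) :=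
  let order : List String := PySem.List.dedup (records.map pvDoctype)
  let cap : Int := PySem.Int.floordiv target_number (order.length : Int)
  let groups :=
    PySem.List.sorted
      (order.map (fun dt =>
        (dt, PySem.List.slice (records.filter (fun r => pvDoctype r == dt)) none (some cap))))
      (fun g => (g.2.length : Int)) true
  ((groups.map (fun g => (g.2.length : Int))).sum, groups)

-- ===== PRECONDITION & SPEC =====
-- Pre_ excludes exactly the raising inputs: empty records (ZeroDivisionError) and a record without a "doctype" key (KeyError)
def Pre_groupby_and_trim_results (records : List (List (String × String))) (target_number : Int) : Prop :=
  records ≠ [] ∧ ∀ r ∈ records, (PySem.Dict.mk r).contains "doctype" = true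
instance (records : List (List (String × String))) (target_number : Int) : Decidable (Pre_groupby_and_trim_results records target_number) := by unfold Pre_groupby_and_trim_results; infer_instance
def pvWitness_groupby_and_trim_results : (List (List (String × String))) × Int := ([[("doctype", "ToDo"), ("name", "t1")]], 3)

def Spec_groupby_and_trim_results (records : List (List (String × String))) (target_number : Int) (out : Int × (List (String × List (List (String × String))))) : Prop := out = groupby_and_trim_results_alt records target_number
instance (records : List (List (String × String))) (target_number : Int) (out : Int × (List (String × List (List (String × String))))) : Decidable (Spec_groupby_and_trim_results records target_number out) := by unfold Spec_groupby_and_trim_results; infer_instance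

-- ===== CLAIM (what is proved, stated in full; the proofs are below) =====
def Claim_equal_groupby_and_trim_results : Prop := ∀ (records : List (List (String × String))) (target_number : Int), Dom_groupby_and_trim_results records target_number → Pre_groupby_and_trim_results records target_number → Spec_groupby_and_trim_results records target_number (groupby_and_trim_results records target_number)

-- ===== LEMMAS AND PROOFS =====

-- a fold whose two state components evolve independently splits into two folds
theorem pv_foldl_prod_split {α β γ : Type} (l : List α) (f : β → α → β) (g : γ → α → γ)
    (b : β) (c : γ) :
    l.foldl (fun p a => (f p.1 a, g p.2 a)) (b, c) = (l.foldl f b, l.foldl g c) := by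
  induction l generalizing b c with
  | nil => rfl
  | cons x xs ih => simp [List.foldl, ih]

-- A's grouping dict, characterised: items are the first-occurrence doctypes paired with the filters
theorem pv_results_items (records : List (List (String × String))) :
    (records.foldl (fun d record => d.modify (pvDoctype record) [] (fun x => x ++ [record]))
        (PySem.Dict.empty : PySem.Dict String (List (List (String × String))))).items
      = (PySem.Set.ofList (records.map pvDoctype)).map
          (fun dt => (dt, records.filter (fun r => pvDoctype r == dt))) := by
  have hfold : records.foldl (fun d record => d.modify (pvDoctype record) [] (fun x => x ++ [record]))
      (PySem.Dict.empty : PySem.Dict String (List (List (String × String))))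
      = (records.map (fun r => (pvDoctype r, r))).foldl
          (fun d p => d.modify p.1 [] (fun x => x ++ [p.2])) PySem.Dict.empty := by
    rw [List.foldl_map]
  have hkeys : (records.foldl (fun d record => d.modify (pvDoctype record) [] (fun x => x ++ [record]))
      (PySem.Dict.empty : PySem.Dict String (List (List (String × String))))).keys
      = PySem.Set.ofList (records.map pvDoctype) := by
    rw [PySem.Dict.keys_foldl_modify_key records pvDoctype [] (fun _ _ v => v ++ [_]) PySem.Dict.empty]
    rw [PySem.Set.ofList_eq_foldl]
    rfl
  have hnodup : (records.foldl (fun d record => d.modify (pvDoctype record) [] (fun x => x ++ [record]))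
      (PySem.Dict.empty : PySem.Dict String (List (List (String × String))))).keys.Nodup := by
    exact PySem.Dict.nodup_keys_foldl_modify_key records pvDoctype [] (fun _ r v => v ++ [r]) PySem.Dict.empty (by simp [PySem.Dict.keys_empty])
  rw [PySem.Dict.items_eq_map_keys _ hnodup [], hkeys]
  apply List.map_congr_left
  intro dt _
  rw [hfold, PySem.Dict.getD_foldl_modify_append]
  simp [PySem.Dict.getD_empty, List.filter_map, Function.comp_def]

theorem groupby_trim_eq (records : List (List (String × String))) (target_number : Int) :
    groupby_and_trim_results records target_number = groupby_and_trim_results_alt records target_number := by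
  unfold groupby_and_trim_results groupby_and_trim_results_alt
  rw [PySem.List.dedup_eq_ofList]
  set dts := PySem.Set.ofList (records.map pvDoctype) with hdts
  have hitems := pv_results_items records
  have hnd : dts.Nodup := PySem.Set.nodup_ofList _
  simp only [PySem.Dict.size, hitems, List.length_map]
  set mgl := PySem.Int.floordiv target_number (dts.length : Int) with hmgl
  set trim := fun dt => PySem.List.slice (records.filter (fun r => pvDoctype r == dt)) none (some mgl) with htrim
  -- split A's pair fold into its independent components
  rw [pv_foldl_prod_split
      (dts.map (fun dt => (dt, records.filter (fun r => pvDoctype r == dt))))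
      (fun (d : PySem.Dict String (List (List (String × String)))) it =>
        d.insert it.1 (PySem.List.slice it.2 none (some mgl)))
      (fun (n : Int) it => n + ((PySem.List.slice it.2 none (some mgl)).length : Int))
      PySem.Dict.empty 0]
  -- A's dict of trimmed groups: its items are the trimmed map over dts
  have h1 : ((dts.map (fun dt => (dt, records.filter (fun r => pvDoctype r == dt)))).foldl
      (fun (d : PySem.Dict String (List (List (String × String)))) it =>
        d.insert it.1 (PySem.List.slice it.2 none (some mgl))) PySem.Dict.empty).items
      = dts.map (fun dt => (dt, trim dt)) := by
    rw [List.foldl_map]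
    rw [PySem.Dict.items_foldl_insert_fresh dts (fun dt => dt) trim
        PySem.Dict.empty (by intro a _; exact PySem.Dict.contains_empty a) (by simpa using hnd)]
    rfl
  -- A's running count is the sum of the trimmed lengths
  have h2 : (dts.map (fun dt => (dt, records.filter (fun r => pvDoctype r == dt)))).foldl
      (fun (n : Int) it => n + ((PySem.List.slice it.2 none (some mgl)).length : Int)) (0 : Int)
      = ((dts.map (fun dt => (dt, trim dt))).map (fun g => (g.2.length : Int))).sum := by
    rw [List.foldl_map, PySem.List.foldl_add]
    simp [List.map_map, Function.comp_def, htrim]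
  -- B's sum ranges over the sorted list, a permutation of the same groups
  have hperm : (PySem.List.sorted (dts.map (fun dt => (dt, trim dt)))
      (fun g => (g.2.length : Int)) true).Perm (dts.map (fun dt => (dt, trim dt))) :=
    PySem.List.sorted_perm _ _ _
  have h3 : ((PySem.List.sorted (dts.map (fun dt => (dt, trim dt)))
      (fun g => (g.2.length : Int)) true).map (fun g => (g.2.length : Int))).sum
      = ((dts.map (fun dt => (dt, trim dt))).map (fun g => (g.2.length : Int))).sum :=
    (hperm.map _).sum_eq
  rw [h1, h2, ← h3]

-- ===== VERDICT (by name: the statement is the Claim_ definition above) =====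
theorem groupby_and_trim_results_spec : Claim_equal_groupby_and_trim_results := by
  intro records target_number _ _
  unfold Spec_groupby_and_trim_results
  exact groupby_trim_eq records target_number
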